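-- pv_equiv track=rewrite | github.com/martinpavez/data | hw_extra/script_cmip6_test_file.py | check_continuous_coverage_intermediate
-- ===== SOURCE A (Python) =====
-- def check_continuous_coverage_intermediate(years):
--     """
--     Check if years provide continuous temporal coverage for intermediate data.
--
--     Args:
--         years (list): List of (filename, year) tuples
--
--     Returns:
--         tuple: (is_continuous, gaps, year_range)
--     """
--     if not years:
--         return False, [], set()
--
--     year_set = set(year for _, year in years)
--
--     if year_set:
--         min_year = min(year_set)
--         max_year = max(year_set)
--         expected_years = set(range(min_year, max_year + 1))
--         gaps = sorted(expected_years - year_set)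
--     else:
--         gaps = []
--
--     is_continuous = len(gaps) == 0
--
--     return is_continuous, gaps, year_set
-- ===== SOURCE B (Python) =====
-- def check_continuous_coverage_intermediate(years):
--     """
--     Check if years provide continuous temporal coverage for intermediate data.
--
--     Gap detection by a sorted consecutive-pair scan instead of building the
--     full expected range and taking a set difference.
--     """
--     if not years:
--         return False, [], set()
--
--     year_set = {year for _, year in years}
--     ordered = sorted(year_set)
--
--     gaps = []
--     for prev, cur in zip(ordered, ordered[1:]):
--         gaps.extend(range(prev + 1, cur))
--
--     return not gaps, gaps, year_set
-- ===== Notes on version B (the rewrite author's own statement) =====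
-- stated objective: alternative
-- what changed: Gaps are found by sorting the distinct years once and filling range(prev+1, cur) between each consecutive pair, instead of materialising the whole expected range as a set, subtracting the year set and sorting the difference.
import Mathlib
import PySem

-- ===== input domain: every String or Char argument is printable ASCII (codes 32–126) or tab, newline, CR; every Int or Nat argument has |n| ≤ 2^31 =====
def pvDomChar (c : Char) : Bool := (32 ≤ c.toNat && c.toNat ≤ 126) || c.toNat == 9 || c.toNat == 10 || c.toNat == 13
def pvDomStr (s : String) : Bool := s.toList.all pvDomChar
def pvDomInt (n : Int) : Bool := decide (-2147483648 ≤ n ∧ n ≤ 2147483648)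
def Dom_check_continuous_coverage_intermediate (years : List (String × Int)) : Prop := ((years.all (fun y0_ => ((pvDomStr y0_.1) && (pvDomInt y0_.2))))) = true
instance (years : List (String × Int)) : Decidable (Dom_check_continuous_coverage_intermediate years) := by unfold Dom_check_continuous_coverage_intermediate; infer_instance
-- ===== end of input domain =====

-- B replaces A's build-expected-range-and-set-subtract gap computation by a sorted
-- consecutive-pair scan that emits range(prev+1, cur) at each jump (alternative algorithm).

-- ===== PORT A =====
def check_continuous_coverage_intermediate (years : List (String × Int)) : Bool × List Int × List Int :=
  if years = [] then (false, [], [])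
  else
    let year_set : PySem.Set Int := PySem.Set.ofList (years.map (fun p => p.2))
    let gaps : List Int :=
      if year_set ≠ [] then
        -- min(year_set)/max(year_set); the none branches are unreachable (year_set ≠ [])
        match PySem.List.min? year_set (fun x => x), PySem.List.max? year_set (fun x => x) with
        | some min_year, some max_year =>
            let expected_years : PySem.Set Int :=
              PySem.Set.ofList (PySem.List.pyRange min_year (max_year + 1))
            PySem.List.sorted (PySem.Set.diff expected_years year_set) (fun x => x)
        | _, _ => []
      else []
    (gaps.length == 0, gaps, year_set)

-- ===== PORT B =====
def check_continuous_coverage_intermediate_alt (years : List (String × Int)) : Bool × List Int × List Int :=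
  if years = [] then (false, [], [])
  else
    let year_set : PySem.Set Int := PySem.Set.ofList (years.map (fun p => p.2))
    let ordered := PySem.List.sorted year_set (fun x => x)
    -- for prev, cur in zip(ordered, ordered[1:]): gaps.extend(range(prev+1, cur))
    let gaps : List Int :=
      (ordered.zip ordered.tail).foldl
        (fun acc pc => acc ++ PySem.List.pyRange (pc.1 + 1) pc.2) []
    (gaps.isEmpty, gaps, year_set)

-- ===== PRECONDITION & SPEC =====
def Spec_check_continuous_coverage_intermediate (years : List (String × Int)) (out : Bool × List Int × List Int) : Prop := out = check_continuous_coverage_intermediate_alt years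
instance (years : List (String × Int)) (out : Bool × List Int × List Int) : Decidable (Spec_check_continuous_coverage_intermediate years out) := by unfold Spec_check_continuous_coverage_intermediate; infer_instance

-- ===== CLAIM (what is proved, stated in full; the proofs are below) =====
def Claim_equal_check_continuous_coverage_intermediate : Prop := ∀ (years : List (String × Int)), Dom_check_continuous_coverage_intermediate years → Spec_check_continuous_coverage_intermediate years (check_continuous_coverage_intermediate years)

-- ===== LEMMAS AND PROOFS =====

-- head of a strictly increasing list is ≤ every member
lemma pv_head_le {a : Int} {t : List Int} (h : (a :: t).Pairwise (· < ·))
    {y : Int} (hy : y ∈ a :: t) : a ≤ y := by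
  rcases List.mem_cons.mp hy with rfl | hy
  · exact le_refl _
  · exact le_of_lt ((List.pairwise_cons.mp h).1 y hy)

-- getLast of a strictly increasing list is ≥ every member
lemma pv_le_getLast {l : List Int} (h : l.Pairwise (· < ·)) (hne : l ≠ [])
    {y : Int} (hy : y ∈ l) : y ≤ l.getLast hne := by
  induction l with
  | nil => exact absurd rfl hne
  | cons a t ih =>
    cases t with
    | nil => simp_all
    | cons b t' =>
      rcases List.mem_cons.mp hy with rfl | hy
      · exact le_trans (le_of_lt ((List.pairwise_cons.mp h).1 b (by simp)))
          (pv_head_le (List.pairwise_cons.mp h).2 (List.getLast_mem _))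
      · exact ih (List.pairwise_cons.mp h).2 (by simp) hy

-- KEY: on a strictly increasing list l = a :: t, the years of [min, max] missing from l
-- are exactly the concatenation of the open ranges between consecutive elements of l.
lemma pv_filter_range_eq_gaps : ∀ (t : List Int) (a : Int),
    (a :: t).Pairwise (· < ·) →
    (PySem.List.pyRange a ((a :: t).getLast (by simp) + 1)).filter
        (fun y => !((a :: t).contains y)) =
      ((a :: t).zip t).flatMap (fun pc => PySem.List.pyRange (pc.1 + 1) pc.2) := by
  intro t
  induction t with
  | nil =>
    intro a _
    simp [PySem.List.pyRange_one_singleton]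
  | cons b t' ih =>
    intro a hpw
    have hab : a < b := (List.pairwise_cons.mp hpw).1 b (by simp)
    have hpw' : (b :: t').Pairwise (· < ·) := (List.pairwise_cons.mp hpw).2
    have hbL : b ≤ (b :: t').getLast (by simp) :=
      pv_le_getLast hpw' (by simp) (by simp)
    have hlast : (a :: b :: t').getLast (by simp) = (b :: t').getLast (by simp) := by
      simp [List.getLast]
    rw [hlast,
        PySem.List.pyRange_one_append a b ((b :: t').getLast (by simp) + 1)
          (le_of_lt hab) (by omega),
        PySem.List.pyRange_one_cons hab,
        List.filter_append, List.filter_cons]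
    have h1 : ((a :: b :: t').contains a) = true := by simp
    -- elements strictly between a and b are in none of the list
    have h2 : (PySem.List.pyRange (a + 1) b).filter
        (fun y => !((a :: b :: t').contains y)) = PySem.List.pyRange (a + 1) b := by
      apply List.filter_eq_self.mpr
      intro y hy
      have hy' := PySem.List.mem_pyRange_one.mp hy
      simp only [Bool.not_eq_eq_eq_not, Bool.not_true, List.contains_eq_mem, decide_eq_false_iff_not]
      intro hmem
      rcases List.mem_cons.mp hmem with rfl | hmem
      · omega
      · have := pv_head_le hpw' hmem; omega
    -- elements ≥ b: membership in a :: b :: t' coincides with membership in b :: t'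
    have h3 : (PySem.List.pyRange b ((b :: t').getLast (by simp) + 1)).filter
          (fun y => !((a :: b :: t').contains y)) =
        (PySem.List.pyRange b ((b :: t').getLast (by simp) + 1)).filter
          (fun y => !((b :: t').contains y)) := by
      apply List.filter_congr
      intro y hy
      have hy' := PySem.List.mem_pyRange_one.mp hy
      simp only [List.contains_eq_mem, List.mem_cons]
      have : ¬ y = a := by omega
      simp [this]
    rw [h2, h3, ih b hpw']
    simp [List.flatMap_cons]

-- the filtered range is strictly increasing, so sorting it is the identity
lemma pv_sorted_filter (S : List Int) (lo hi : Int) :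
    PySem.List.sorted ((PySem.List.pyRange lo hi).filter (fun y => !(S.contains y)))
      (fun x => x) =
    (PySem.List.pyRange lo hi).filter (fun y => !(S.contains y)) := by
  apply PySem.List.sorted_eq_self_of_pairwise
  exact ((PySem.List.pairwise_lt_pyRange_one lo hi).filter _).imp le_of_lt

-- min? of the set is the head of its sorted enumeration
lemma pv_min_eq_head {S : List Int} {m : Int}
    (hmin : PySem.List.min? S (fun x => x) = some m)
    {a : Int} {t : List Int}
    (hs : PySem.List.sorted S (fun x => x) = a :: t)
    (hpw : (a :: t).Pairwise (· < ·)) : m = a := by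
  have hperm : (a :: t).Perm S := hs ▸ PySem.List.sorted_perm S (fun x => x) false
  have h1 : m ≤ a := PySem.List.min?_isMin hmin a (hperm.mem_iff.mp (by simp))
  have h2 : a ≤ m := pv_head_le hpw (hperm.mem_iff.mpr (PySem.List.min?_mem hmin))
  omega

-- max? of the set is the last element of its sorted enumeration
lemma pv_max_eq_getLast {S : List Int} {m : Int}
    (hmax : PySem.List.max? S (fun x => x) = some m)
    {a : Int} {t : List Int}
    (hs : PySem.List.sorted S (fun x => x) = a :: t)
    (hpw : (a :: t).Pairwise (· < ·)) : m = (a :: t).getLast (by simp) := by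
  have hperm : (a :: t).Perm S := hs ▸ PySem.List.sorted_perm S (fun x => x) false
  have h1 : (a :: t).getLast (by simp) ≤ m :=
    PySem.List.max?_isMax hmax _ (hperm.mem_iff.mp (List.getLast_mem _))
  have h2 : m ≤ (a :: t).getLast (by simp) :=
    pv_le_getLast hpw (by simp) (hperm.mem_iff.mpr (PySem.List.max?_mem hmax))
  omega

-- ===== VERDICT (by name: the statement is the Claim_ definition above) =====
theorem check_continuous_coverage_intermediate_spec : Claim_equal_check_continuous_coverage_intermediate := by
  intro years _
  unfold Spec_check_continuous_coverage_intermediate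
  by_cases hy : years = []
  · simp [check_continuous_coverage_intermediate,
      check_continuous_coverage_intermediate_alt, hy]
  · simp only [check_continuous_coverage_intermediate,
      check_continuous_coverage_intermediate_alt, if_neg hy]
    set S : PySem.Set Int := PySem.Set.ofList (years.map (fun p => p.2)) with hS
    obtain ⟨p, hp⟩ := List.exists_mem_of_ne_nil years hy
    have hmemS : p.2 ∈ S := (PySem.Set.mem_ofList _ _).mpr (List.mem_map_of_mem hp)
    have hSne : S ≠ [] := by intro h; rw [h] at hmemS; simp at hmemS
    have hordne : PySem.List.sorted S (fun x => x) ≠ [] := by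
      rw [ne_eq, PySem.List.sorted_eq_nil_iff]; exact hSne
    obtain ⟨a, t, hat⟩ := List.exists_cons_of_ne_nil hordne
    have hpw : (a :: t).Pairwise (· < ·) := by
      rw [← hat, hS]; exact PySem.List.sorted_ofList_pairwise_lt _
    have hperm : (a :: t).Perm S := hat ▸ PySem.List.sorted_perm S (fun x => x) false
    cases hmin : PySem.List.min? S (fun x => x) with
    | none => exact absurd ((PySem.List.min?_eq_none_iff S fun x => x).mp hmin) hSne
    | some mn =>
    cases hmax : PySem.List.max? S (fun x => x) with
    | none => exact absurd ((PySem.List.max?_eq_none_iff S fun x => x).mp hmax) hSne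
    | some mx =>
    have hmn : mn = a := pv_min_eq_head hmin hat hpw
    have hmx : mx = (a :: t).getLast (by simp) := pv_max_eq_getLast hmax hat hpw
    rw [if_pos hSne]
    -- A's gaps: sorted set difference = filtered range = pairwise gap fill
    have hofr : PySem.Set.ofList (PySem.List.pyRange mn (mx + 1)) =
        PySem.List.pyRange mn (mx + 1) :=
      PySem.Set.ofList_eq_self_of_nodup _ (PySem.List.nodup_pyRange_one _ _)
    have hcong : (PySem.List.pyRange mn (mx + 1)).filter (fun y => !(S.contains y)) =
        (PySem.List.pyRange mn (mx + 1)).filter (fun y => !((a :: t).contains y)) := by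
      apply List.filter_congr
      intro y _
      simp only [List.contains_eq_mem, PySem.Set.contains_eq_listContains,
        hperm.mem_iff]
    have hgapsA : PySem.List.sorted
        (PySem.Set.diff (PySem.Set.ofList (PySem.List.pyRange mn (mx + 1))) S)
          (fun x => x) =
        ((a :: t).zip t).flatMap (fun pc => PySem.List.pyRange (pc.1 + 1) pc.2) := by
      rw [PySem.Set.diff, hofr, hcong] at *
      rw [pv_sorted_filter, hmn, hmx]
      exact pv_filter_range_eq_gaps t a hpw
    have hgapsB : ((PySem.List.sorted S (fun x => x)).zip
          (PySem.List.sorted S (fun x => x)).tail).foldl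
        (fun acc pc => acc ++ PySem.List.pyRange (pc.1 + 1) pc.2) [] =
        ((a :: t).zip t).flatMap (fun pc => PySem.List.pyRange (pc.1 + 1) pc.2) := by
      rw [hat]
      simpa using PySem.List.foldl_append_eq_flatMap
        (fun pc : Int × Int => PySem.List.pyRange (pc.1 + 1) pc.2) ((a :: t).zip t) []
    simp only [hgapsA, hgapsB]
    cases ((a :: t).zip t).flatMap (fun pc => PySem.List.pyRange (pc.1 + 1) pc.2) <;> simp
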